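-- pv_equiv track=rewrite | github.com/OZestina/TheGreatestGrace | codingTest/programmers/py/221031_햄버거.py | solution
-- ===== SOURCE A (Python) =====
-- def check_ham(ingredient, start, end):
--     burger = [2,3]
--     checking = []
--     idx = []
--     for i in range(start + 1, end):
--         if ingredient[i] != 0:
--             checking.append(ingredient[i])
--             idx.append(i)
--     if burger == checking:
--         ingredient[start] = ingredient[end] = ingredient[idx[0]] = ingredient[idx[1]] = 0
--         return 1
--     else: return 0
--
-- def solution(ingredient):
--     answer = 0
--     bread = []
--     for i in range(len(ingredient)):
--         if ingredient[i] == 1: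
--             bread.append(i)
--     b = 1
--     while b < len(bread):
--         if bread[b] - bread[b-1] >= 3:
--             if check_ham(ingredient, bread[b-1], bread[b]):
--                 bread.remove(bread[b-1])
--                 bread.remove(bread[b-1])
--                 answer += 1
--                 b -= 2
--         b += 1
--
--     return answer
-- ===== SOURCE B (Python) =====
-- def solution(ingredient):
--     # one-pass stack: push each item (0 means "no ingredient" and is skipped),
--     # pop and count whenever the top of the stack reads 1,2,3,1
--     stack = []
--     answer = 0
--     for x in ingredient:
--         if x == 0:
--             continue
--         stack.append(x)
--         if stack[-4:] == [1, 2, 3, 1]: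
--             del stack[-4:]
--             answer += 1
--     return answer
-- ===== Notes on version B (the rewrite author's own statement) =====
-- stated objective: alternative
-- what changed: Replaces A's scheme (collect bread indices, repeatedly re-scan the region between neighbouring breads and zero matched cells in place, walking the pointer back after each merge) by a single left-to-right pass with an explicit stack that pops and counts whenever its top four elements read 1,2,3,1 (value 0, which A treats as an absent ingredient, is skipped).
import Mathlib
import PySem

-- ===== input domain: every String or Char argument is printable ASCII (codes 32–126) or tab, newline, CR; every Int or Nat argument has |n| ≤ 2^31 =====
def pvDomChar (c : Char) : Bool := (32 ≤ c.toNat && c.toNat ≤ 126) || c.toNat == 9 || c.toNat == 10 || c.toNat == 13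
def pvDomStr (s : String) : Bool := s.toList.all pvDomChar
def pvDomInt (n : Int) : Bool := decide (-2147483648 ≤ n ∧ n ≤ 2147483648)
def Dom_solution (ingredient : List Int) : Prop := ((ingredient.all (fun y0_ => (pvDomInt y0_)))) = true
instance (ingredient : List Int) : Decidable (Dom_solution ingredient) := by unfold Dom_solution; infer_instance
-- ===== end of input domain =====

-- B replaces A's bread-index bookkeeping (re-scanning between neighbouring breads and
-- zeroing matched cells in place) with a single stack pass; A mutates its argument in
-- place (zeroes matched cells), B does not — the equivalence proved here is about the
-- return value only.

-- ===== PORT A =====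
-- Python in-place assignment `xs[i] = 0`; in A it is only reached with 0 ≤ i < len(xs),
-- where `List.set i.toNat` is exact.
def pySet0 (xs : List Int) (i : Int) : List Int := xs.set i.toNat 0

def check_ham (ingredient : List Int) (start : Int) (end_ : Int) : List Int × Int :=
  let burger : List Int := [2, 3]
  let ci := (PySem.List.pyRange (start + 1) end_ 1).foldl
    (fun (s : List Int × List Int) i =>
      if (PySem.List.pyGet? ingredient i).getD 0 ≠ 0 then
        (s.1 ++ [(PySem.List.pyGet? ingredient i).getD 0], s.2 ++ [i])
      else s) ([], [])
  let checking := ci.1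
  let idx := ci.2
  if burger = checking then
    -- ingredient[start] = ingredient[end] = ingredient[idx[0]] = ingredient[idx[1]] = 0
    -- (idx has exactly two entries whenever checking == [2,3], so idx[0]/idx[1] exist)
    let i1 := pySet0 ingredient start
    let i2 := pySet0 i1 end_
    let i3 := pySet0 i2 ((PySem.List.pyGet? idx 0).getD 0)
    let i4 := pySet0 i3 ((PySem.List.pyGet? idx 1).getD 0)
    (i4, 1)
  else (ingredient, 0)

-- cited by solLoop's decreasing_by: a successful Python list.remove shortens by one
theorem pvRemoveLen {xs ys : List Int} {v : Int}
    (h : PySem.List.remove? xs v = some ys) : ys.length + 1 = xs.length := by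
  have hv : v ∈ xs := by
    by_contra hv
    rw [(PySem.List.remove?_eq_none_iff xs v).mpr hv] at h
    simp at h
  rw [PySem.List.remove?_eq_some_erase xs v hv] at h
  cases h
  exact List.length_erase_add_one hv

-- the while loop of A's `solution` (b -= 2; b += 1 kept as written); the two `none`
-- branches are Python's unreachable ValueError from list.remove
def solLoop (ing : List Int) (bread : List Int) (b : Int) (answer : Int) : Int :=
  if hb : b < (bread.length : Int) then
    let qb := (PySem.List.pyGet? bread b).getD 0
    let qb1 := (PySem.List.pyGet? bread (b - 1)).getD 0
    if qb - qb1 ≥ 3 then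
      let r := check_ham ing qb1 qb
      if r.2 ≠ 0 then
        match h1 : PySem.List.remove? bread qb1 with
        | none => answer
        | some bd1 =>
          match h2 : PySem.List.remove? bd1 ((PySem.List.pyGet? bd1 (b - 1)).getD 0) with
          | none => answer
          | some bd2 => solLoop r.1 bd2 (b - 2 + 1) (answer + 1)
      else solLoop ing bread (b + 1) answer
    else solLoop ing bread (b + 1) answer
  else answer
termination_by (2 * (bread.length : Int) - b).toNat
decreasing_by
  · have e1 := pvRemoveLen h1
    have e2 := pvRemoveLen h2
    omega
  · omega
  · omega

def solution (ingredient : List Int) : Int :=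
  let answer : Int := 0
  let bread := (PySem.List.pyRange 0 (ingredient.length : Int) 1).foldl
    (fun (acc : List Int) i =>
      if (PySem.List.pyGet? ingredient i).getD 0 = 1 then acc ++ [i] else acc) []
  solLoop ingredient bread 1 answer

-- ===== PORT B =====
def solution_alt (ingredient : List Int) : Int :=
  (ingredient.foldl
    (fun (s : List Int × Int) x =>
      if x = 0 then s
      else
        let st := s.1 ++ [x]
        if PySem.List.slice st (some (-4)) none = ([1, 2, 3, 1] : List Int) then
          (PySem.List.slice st none (some (-4)), s.2 + 1)
        else (st, s.2)) (([] : List Int), (0 : Int))).2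

-- ===== PRECONDITION & SPEC =====
def Spec_solution (ingredient : List Int) (out : Int) : Prop := out = solution_alt ingredient
instance (ingredient : List Int) (out : Int) : Decidable (Spec_solution ingredient out) := by unfold Spec_solution; infer_instance

-- ===== CLAIM (what is proved, stated in full; the proofs are below) =====
def Claim_equal_solution : Prop := ∀ (ingredient : List Int), Dom_solution ingredient → Spec_solution ingredient (solution ingredient)

-- ===== LEMMAS AND PROOFS =====

-- ---- the stack machine (B's loop body on a nonzero element) ----
def cstep (s : List Int × Int) (x : Int) : List Int × Int :=
  let st := s.1 ++ [x]
  if PySem.List.slice st (some (-4)) none = ([1, 2, 3, 1] : List Int) then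
    (PySem.List.slice st none (some (-4)), s.2 + 1)
  else (st, s.2)

def Sc (xs : List Int) : Int := (xs.foldl cstep (([] : List Int), (0 : Int))).2

def filterNZ (xs : List Int) : List Int := xs.filter (fun x => decide (x ≠ 0))

def HasB (u : List Int) : Prop := ∃ a b, u = a ++ [1, 2, 3, 1] ++ b
def Ends123 (u : List Int) : Prop := ∃ t, u = t ++ [1, 2, 3]

lemma alt_eq_Sc (ing : List Int) : solution_alt ing = Sc (filterNZ ing) := by
  unfold solution_alt Sc filterNZ
  congr 1
  have : (fun (s : List Int × Int) (x : Int) =>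
      if x = 0 then s
      else
        let st := s.1 ++ [x]
        if PySem.List.slice st (some (-4)) none = ([1, 2, 3, 1] : List Int) then
          (PySem.List.slice st none (some (-4)), s.2 + 1)
        else (st, s.2)) = (fun s x => if x ≠ 0 then cstep s x else s) := by
    funext s x
    by_cases h : x = 0 <;> simp [h, cstep]
  rw [this, PySem.List.foldl_ite_eq_foldl_filter]

lemma slice_pop_iff (σ : List Int) (x : Int) :
    PySem.List.slice (σ ++ [x]) (some (-4)) none = ([1, 2, 3, 1] : List Int) ↔
      (Ends123 σ ∧ x = 1) := by
  rw [PySem.List.slice_from_neg_ofNat (σ ++ [x]) 4 (by omega)]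
  constructor
  · intro h
    have hlen : (σ ++ [x]).length - ((σ ++ [x]).length - 4) = 4 := by
      have := congrArg List.length h
      simp [List.length_drop] at this ⊢
      omega
    have hsplit := List.take_append_drop ((σ ++ [x]).length - 4) (σ ++ [x])
    rw [h] at hsplit
    have : σ ++ [x] = ((σ ++ [x]).take ((σ ++ [x]).length - 4) ++ [1,2,3]) ++ [1] := by
      rw [← hsplit]; simp
    obtain ⟨hσ, hx⟩ := List.append_singleton_inj.mp this
    exact ⟨⟨_, hσ⟩, hx⟩
  · rintro ⟨⟨t, ht⟩, hx⟩
    subst ht hx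
    have : (t ++ [1,2,3]) ++ [(1:Int)] = t ++ [1,2,3,1] := by simp
    rw [this]
    have hl : (t ++ [(1:Int),2,3,1]).length - 4 = t.length := by simp
    rw [hl]
    exact List.drop_left

lemma cstep_c (s : List Int × Int) (x : Int) :
    (cstep s x).1 = (cstep (s.1, 0) x).1 ∧ (cstep s x).2 = s.2 + (cstep (s.1, 0) x).2 := by
  unfold cstep
  by_cases h : PySem.List.slice (s.1 ++ [x]) (some (-4)) none = ([1, 2, 3, 1] : List Int) <;>
    simp [h]

lemma cstep_nopop {σ : List Int} {c x : Int}
    (h : ¬ (Ends123 σ ∧ x = 1)) : cstep (σ, c) x = (σ ++ [x], c) := by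
  unfold cstep
  simp only []
  rw [if_neg]
  rw [slice_pop_iff]; exact h

lemma cstep_pop {t : List Int} {c : Int} : cstep (t ++ [1, 2, 3], c) 1 = (t, c + 1) := by
  unfold cstep
  simp only []
  rw [if_pos]
  · congr 1
    rw [PySem.List.slice_to_neg_ofNat _ 4 (by omega)]
    have : ((t ++ [1,2,3]) ++ [(1:Int)]).length - 4 = t.length := by simp
    rw [this]
    have : ((t ++ [1,2,3]) ++ [(1:Int)]) = t ++ [1,2,3,1] := by simp
    rw [this]
    exact List.take_left
  · rw [slice_pop_iff]; exact ⟨⟨t, rfl⟩, rfl⟩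

lemma foldl_cstep_affine (xs : List Int) : ∀ (σ : List Int) (c : Int),
    xs.foldl cstep (σ, c) = ((xs.foldl cstep (σ, 0)).1, c + (xs.foldl cstep (σ, 0)).2) := by
  induction xs with
  | nil => intro σ c; simp
  | cons x xs ih =>
    intro σ c
    simp only [List.foldl_cons]
    obtain ⟨h1, h2⟩ := cstep_c (σ, c) x
    have hc : cstep (σ, c) x = ((cstep (σ, 0) x).1, c + (cstep (σ, 0) x).2) := by
      rcases hcs : cstep (σ, c) x with ⟨a, b⟩
      rcases hc0 : cstep (σ, 0) x with ⟨a0, b0⟩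
      simp [hcs, hc0] at h1 h2
      simp [h1, h2]
    rw [hc]
    rcases hc0 : cstep (σ, 0) x with ⟨a0, b0⟩
    rw [ih a0 (c + b0), ih a0 b0]
    have h0 := ih a0 0
    rw [h0]
    simp
    omega

lemma noPop : ∀ (u v : List Int) (c : Int), ¬ HasB (v ++ u) →
    u.foldl cstep (v, c) = (v ++ u, c) := by
  intro u
  induction u with
  | nil => intro v c _; simp
  | cons x u' ih =>
    intro v c h
    simp only [List.foldl_cons]
    have hnp : ¬ (Ends123 v ∧ x = 1) := by
      rintro ⟨⟨t, ht⟩, hx⟩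
      subst ht hx
      exact h ⟨t, u', by simp⟩
    rw [cstep_nopop hnp]
    have := ih (v ++ [x]) c (by simpa using h)
    simpa using this

lemma Sc_no {u : List Int} (h : ¬ HasB u) : Sc u = 0 := by
  unfold Sc
  rw [noPop u [] 0 (by simpa using h)]

lemma Sc_reduce {u v : List Int} (h1 : ¬ HasB u) (h2 : ¬ Ends123 u) :
    Sc (u ++ [1, 2, 3, 1] ++ v) = 1 + Sc (u ++ v) := by
  unfold Sc
  rw [List.foldl_append, List.foldl_append]
  have hnp : List.foldl cstep (([]:List Int), (0:Int)) u = (u, 0) := by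
    have := noPop u [] 0 (by simpa using h1)
    simpa using this
  rw [hnp]
  have s1 : cstep (u, (0:Int)) 1 = (u ++ [1], 0) := cstep_nopop (by simp [h2])
  have e2 : ¬ (Ends123 (u ++ [(1:Int)]) ∧ (2:Int) = 1) := by rintro ⟨_, h⟩; omega
  have e3 : ¬ (Ends123 (u ++ [(1:Int), 2]) ∧ (3:Int) = 1) := by rintro ⟨_, h⟩; omega
  have s2 : cstep (u ++ [(1:Int)], (0:Int)) 2 = (u ++ [1, 2], 0) := by
    rw [cstep_nopop e2]; simp
  have s3 : cstep (u ++ [(1:Int), 2], (0:Int)) 3 = (u ++ [1, 2, 3], 0) := by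
    rw [cstep_nopop e3]; simp
  have s4 : cstep (u ++ [(1:Int), 2, 3], (0:Int)) 1 = (u, 1) := by
    have : u ++ [(1:Int), 2, 3] = u ++ [1,2,3] := rfl
    exact cstep_pop
  simp only [List.foldl_cons, List.foldl_nil]
  rw [s1, s2, s3, s4]
  rw [foldl_cstep_affine v u 1]
  conv_rhs => rw [List.foldl_append]
  rw [hnp]

-- ---- decomposition of a list into 1-free parts separated by 1s ----
def join1 : List (List Int) → List Int
  | [] => []
  | [s] => s
  | s :: r :: t => s ++ 1 :: join1 (r :: t)

def split1 : List Int → List (List Int)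
  | [] => [[]]
  | x :: xs =>
    if x = 1 then [] :: split1 xs
    else
      match split1 xs with
      | [] => [[x]]
      | s :: r => (x :: s) :: r

lemma split1_ne_nil : ∀ (xs : List Int), split1 xs ≠ []
  | [] => by simp [split1]
  | x :: xs => by
    by_cases h : x = 1
    · simp [split1, h]
    · simp only [split1, if_neg h]
      cases hs : split1 xs <;> simp

lemma join1_cons {a : List Int} {Y : List (List Int)} (h : Y ≠ []) :
    join1 (a :: Y) = a ++ 1 :: join1 Y := by
  cases Y with
  | nil => exact absurd rfl h
  | cons y t => rfl

lemma join1_headcons (x : Int) (s : List Int) (r : List (List Int)) :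
    join1 ((x :: s) :: r) = x :: join1 (s :: r) := by
  cases r <;> rfl

lemma join1_split1 : ∀ (xs : List Int), join1 (split1 xs) = xs
  | [] => rfl
  | x :: xs => by
    by_cases h : x = 1
    · rw [show split1 (x :: xs) = [] :: split1 xs by simp [split1, h]]
      rw [join1_cons (split1_ne_nil xs)]
      simp [h, join1_split1 xs]
    · cases hs : split1 xs with
      | nil => exact absurd hs (split1_ne_nil xs)
      | cons s r =>
        rw [show split1 (x :: xs) = (x :: s) :: r by simp [split1, h, hs]]
        rw [join1_headcons, ← hs, join1_split1 xs]

lemma split1_one_free : ∀ (xs : List Int), ∀ s ∈ split1 xs, (1 : Int) ∉ s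
  | [] => by simp [split1]
  | x :: xs => by
    intro s hs
    by_cases h : x = 1
    · rw [show split1 (x :: xs) = [] :: split1 xs by simp [split1, h]] at hs
      rcases List.mem_cons.mp hs with rfl | hm
      · simp
      · exact split1_one_free xs s hm
    · cases h0 : split1 xs with
      | nil => exact absurd h0 (split1_ne_nil xs)
      | cons s0 r =>
        rw [show split1 (x :: xs) = (x :: s0) :: r by simp [split1, h, h0]] at hs
        rcases List.mem_cons.mp hs with rfl | hm
        · intro hmem
          rcases List.mem_cons.mp hmem with h1 | h1
          · exact h (h1.symm)
          · exact split1_one_free xs s0 (h0 ▸ List.mem_cons_self) h1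
        · exact split1_one_free xs s (h0 ▸ List.mem_cons_of_mem s0 hm)

lemma join1_append : ∀ {P Q : List (List Int)}, P ≠ [] → Q ≠ [] →
    join1 (P ++ Q) = join1 P ++ 1 :: join1 Q
  | [], _, hP, _ => absurd rfl hP
  | [p], Q, _, hQ => by
    simp only [List.singleton_append]
    rw [join1_cons hQ]; rfl
  | p :: p2 :: P, Q, _, hQ => by
    have h1 : join1 ((p :: p2 :: P) ++ Q) = p ++ 1 :: join1 ((p2 :: P) ++ Q) := by
      rw [show (p :: p2 :: P) ++ Q = p :: ((p2 :: P) ++ Q) by simp]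
      exact join1_cons (by simp)
    rw [h1, join1_append (by simp) hQ]
    simp [join1]

lemma filterNZ_join1 : ∀ (R : List (List Int)),
    filterNZ (join1 R) = join1 (R.map filterNZ)
  | [] => rfl
  | [s] => rfl
  | s :: r :: t => by
    have h1 : join1 (s :: r :: t) = s ++ 1 :: join1 (r :: t) := rfl
    have h2 : join1 (filterNZ s :: filterNZ r :: t.map filterNZ)
        = filterNZ s ++ 1 :: join1 (filterNZ r :: t.map filterNZ) := rfl
    simp only [List.map_cons, h1, h2]
    have h3 := filterNZ_join1 (r :: t)
    simp only [List.map_cons] at h3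
    rw [← h3]
    simp [filterNZ]

lemma sep_split : ∀ (s : List Int) {w a c : List Int}, (1 : Int) ∉ s →
    s ++ 1 :: w = a ++ 1 :: c →
    (a = s ∧ c = w) ∨ ∃ a', a = s ++ 1 :: a' ∧ w = a' ++ 1 :: c
  | [], w, a, c => by
    intro _ h
    cases a with
    | nil => left; simp_all
    | cons z a' =>
      right
      simp only [List.nil_append, List.cons_append, List.cons.injEq] at h
      exact ⟨a', by simp [h.1.symm], h.2⟩
  | x :: s', w, a, c => by
    intro hs h
    cases a with
    | nil =>
      exfalso
      simp only [List.cons_append, List.nil_append, List.cons.injEq] at h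
      exact hs (by simp [h.1])
    | cons z a2 =>
      simp only [List.cons_append, List.cons.injEq] at h
      rcases sep_split s' (fun hm => hs (List.mem_cons_of_mem x hm)) h.2 with ⟨rfl, rfl⟩ | ⟨a', ha, hw⟩
      · left; exact ⟨by simp [h.1], rfl⟩
      · right; exact ⟨a', by simp [h.1, ha], hw⟩

lemma hasB_join1 : ∀ (segs : List (List Int)), (∀ s ∈ segs, (1 : Int) ∉ s) →
    HasB (join1 segs) →
    ∃ i : Nat, 0 < i ∧ i + 1 < segs.length ∧ segs[i]? = some [2, 3]
  | [] => by
    rintro _ ⟨a, b, h⟩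
    simp [join1] at h
  | [s] => by
    rintro hf ⟨a, b, h⟩
    exact absurd (by rw [show join1 [s] = s from rfl] at h; rw [h]; simp) (hf s (by simp))
  | s :: s' :: r => by
    rintro hf ⟨a, bb, h⟩
    rw [join1_cons (by simp : s' :: r ≠ [])] at h
    rw [show a ++ [(1:Int),2,3,1] ++ bb = a ++ 1 :: (2 :: 3 :: 1 :: bb) by simp] at h
    rcases sep_split s (hf s (by simp)) h with ⟨_, hc⟩ | ⟨a', _, hw⟩
    · cases r with
      | nil =>
        exfalso
        have : (1:Int) ∈ s' := by
          have hc' : (2:Int) :: 3 :: 1 :: bb = s' := hc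
          rw [← hc']; simp
        exact hf s' (by simp) this
      | cons r0 r1 =>
        rw [join1_cons (by simp : r0 :: r1 ≠ [])] at hc
        rw [show (2:Int) :: 3 :: 1 :: bb = [2,3] ++ 1 :: bb by simp] at hc
        rcases sep_split s' (hf s' (by simp)) hc.symm with ⟨hs', _⟩ | ⟨a'', ha'', _⟩
        · exact ⟨1, by omega, by simp, by simp [hs']⟩
        · exfalso
          have : (1:Int) ∈ [(2:Int), 3] := by rw [ha'']; simp
          simp at this
    · have hHB : HasB (join1 (s' :: r)) :=
        ⟨a', bb, by rw [hw]; simp⟩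
      obtain ⟨i, hi, hlen, hget⟩ := hasB_join1 (s' :: r) (fun t ht => hf t (by simp [ht])) hHB
      refine ⟨i + 1, by omega, by simp at hlen ⊢; omega, ?_⟩
      simpa using hget

lemma ends123_join1 : ∀ (segs : List (List Int)), (∀ s ∈ segs, (1 : Int) ∉ s) →
    (∀ i : Nat, 0 < i → i + 1 = segs.length → segs[i]? ≠ some [2, 3]) →
    ¬ Ends123 (join1 segs)
  | [] => by
    rintro _ _ ⟨t, ht⟩
    simp [join1] at ht
  | [s] => by
    rintro hf _ ⟨t, ht⟩
    exact hf s (by simp) (by rw [show join1 [s] = s from rfl] at ht; rw [ht]; simp)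
  | s :: s' :: r => by
    rintro hf hlast ⟨t, ht⟩
    rw [join1_cons (by simp : s' :: r ≠ [])] at ht
    rw [show t ++ [(1:Int),2,3] = t ++ 1 :: [2,3] by simp] at ht
    rcases sep_split s (hf s (by simp)) ht with ⟨_, hc⟩ | ⟨a', _, hw⟩
    · cases r with
      | nil =>
        have hs' : s' = [2,3] := by
          have : ([2,3] : List Int) = s' := hc
          exact this.symm
        exact hlast 1 (by omega) (by simp) (by simp [hs'])
      | cons r0 r1 =>
        exfalso
        rw [join1_cons (by simp : r0 :: r1 ≠ [])] at hc
        have : (1:Int) ∈ [(2:Int), 3] := by rw [hc]; simp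
        simp at this
    · exact ends123_join1 (s' :: r) (fun u hu => hf u (by simp [hu]))
        (fun i hi hl => by
          have := hlast (i + 1) (by omega)
            (by simp only [List.length_cons] at hl ⊢; omega)
          simpa using this)
        ⟨a', hw⟩

-- ---- positions of the 1s (A's bread list) ----
def onesP : List Int → List Nat
  | [] => []
  | x :: xs => (if x = 1 then [0] else []) ++ (onesP xs).map (· + 1)

lemma onesP_append : ∀ (X Y : List Int),
    onesP (X ++ Y) = onesP X ++ (onesP Y).map (· + X.length)
  | [], Y => by simp [onesP]
  | x :: X, Y => by
    simp only [List.cons_append, onesP, onesP_append X Y, List.map_append, List.map_map,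
      List.append_assoc, List.length_cons]
    congr 2

lemma onesP_lt : ∀ (xs : List Int), ∀ k ∈ onesP xs, k < xs.length
  | [] => by simp [onesP]
  | x :: xs => by
    intro k hk
    simp only [onesP, List.mem_append] at hk
    rcases hk with hk | hk
    · by_cases h : x = 1 <;> simp [h] at hk
      simp [hk]
    · obtain ⟨j, hj, rfl⟩ := List.mem_map.mp hk
      have := onesP_lt xs j hj
      simp; omega

lemma onesP_nil_of_free : ∀ {xs : List Int}, (1 : Int) ∉ xs → onesP xs = []
  | [], _ => rfl
  | x :: xs, h => by
    have hx : x ≠ 1 := fun hx => h (by simp [hx])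
    simp only [onesP, if_neg hx, List.nil_append]
    rw [onesP_nil_of_free (fun hm => h (List.mem_cons_of_mem x hm))]
    rfl

lemma onesP_pairwise : ∀ (xs : List Int), (onesP xs).Pairwise (· < ·)
  | [] => by simp [onesP]
  | x :: xs => by
    have ih := onesP_pairwise xs
    simp only [onesP]
    apply List.pairwise_append.mpr
    refine ⟨?_, ?_, ?_⟩
    · by_cases h : x = 1 <;> simp [h]
    · exact List.pairwise_map.mpr (ih.imp (by omega))
    · intro a ha b hb
      by_cases h : x = 1 <;> simp [h] at ha
      obtain ⟨j, _, rfl⟩ := List.mem_map.mp hb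
      omega

lemma onesP_join1_len : ∀ (P : List (List Int)), P ≠ [] → (∀ s ∈ P, (1 : Int) ∉ s) →
    (onesP (join1 P)).length + 1 = P.length
  | [], h, _ => absurd rfl h
  | [p], _, hf => by
    rw [show join1 [p] = p from rfl, onesP_nil_of_free (hf p (by simp))]
    rfl
  | p :: r :: t, _, hf => by
    rw [join1_cons (by simp : r :: t ≠ [])]
    rw [onesP_append, onesP_nil_of_free (hf p (by simp))]
    have := onesP_join1_len (r :: t) (by simp) (fun s hs => hf s (by simp [hs]))
    simp [onesP] at this ⊢
    omega

lemma onesP_block (A rb B : List Int) (hrb : (1 : Int) ∉ rb) :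
    onesP (A ++ 1 :: (rb ++ 1 :: B)) =
      onesP A ++ A.length :: (A.length + rb.length + 1) ::
        (onesP B).map (· + (A.length + rb.length + 2)) := by
  rw [onesP_append]
  congr 1
  rw [show (1:Int) :: (rb ++ 1 :: B) = [1] ++ (rb ++ ([1] ++ B)) by simp]
  rw [onesP_append, onesP_append, onesP_append, onesP_nil_of_free hrb]
  simp [onesP]
  constructor
  · omega
  · intro a _
    omega

lemma onesP_block0 (A rz B : List Int) (hrz : (1 : Int) ∉ rz) (h0 : (0:Int) ≠ 1) :
    onesP (A ++ 0 :: (rz ++ 0 :: B)) =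
      onesP A ++ (onesP B).map (· + (A.length + rz.length + 2)) := by
  rw [onesP_append]
  congr 1
  rw [show (0:Int) :: (rz ++ 0 :: B) = [0] ++ (rz ++ ([0] ++ B)) by simp]
  rw [onesP_append, onesP_append, onesP_append, onesP_nil_of_free hrz]
  simp [onesP, h0]
  intro a _
  omega

-- ---- check_ham's collection loop ----
lemma ham_loop (ing post : List Int) : ∀ (mid pre : List Int) (acc : List Int × List Int),
    ing = pre ++ mid ++ post →
    (PySem.List.pyRange (pre.length : Int) ((pre.length : Int) + (mid.length : Int)) 1).foldl
      (fun (s : List Int × List Int) i =>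
        if (PySem.List.pyGet? ing i).getD 0 ≠ 0 then
          (s.1 ++ [(PySem.List.pyGet? ing i).getD 0], s.2 ++ [i])
        else s) acc
    = (acc.1 ++ ((PySem.List.enumerate mid (pre.length : Int)).filter
          (fun p => decide (p.2 ≠ 0))).map Prod.snd,
       acc.2 ++ ((PySem.List.enumerate mid (pre.length : Int)).filter
          (fun p => decide (p.2 ≠ 0))).map Prod.fst) := by
  intro mid
  induction mid with
  | nil =>
    intro pre acc _
    rw [PySem.List.pyRange_one_eq_nil (by simp)]
    simp [PySem.List.enumerate]
  | cons m mid ih =>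
    intro pre acc hing
    rw [PySem.List.pyRange_one_cons (by push_cast [List.length_cons]; omega)]
    simp only [List.foldl_cons]
    have hget : PySem.List.pyGet? ing (pre.length : Int) = some m := by
      rw [hing, show pre ++ (m :: mid) ++ post = pre ++ m :: (mid ++ post) by simp]
      exact PySem.List.pyGet?_append_length pre (mid ++ post) m
    have hrange : (PySem.List.pyRange ((pre.length : Int) + 1)
        ((pre.length : Int) + ((m :: mid).length : Int)) 1)
        = PySem.List.pyRange (((pre ++ [m]).length : Int))
          (((pre ++ [m]).length : Int) + (mid.length : Int)) 1 := by
      congr 1 <;> push_cast [List.length_append, List.length_cons, List.length_nil] <;> omega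
    have hing' : ing = (pre ++ [m]) ++ mid ++ post := by
      rw [hing]; simp
    have henum : PySem.List.enumerate (m :: mid) (pre.length : Int)
        = ((pre.length : Int), m) :: PySem.List.enumerate mid ((pre.length : Int) + 1) := by
      simp [PySem.List.enumerate_cons]
    have henum2 : PySem.List.enumerate mid ((pre.length : Int) + 1)
        = PySem.List.enumerate mid (((pre ++ [m]).length : Int)) := by
      congr 1; push_cast [List.length_append, List.length_cons, List.length_nil]; omega
    by_cases hm : m = 0
    · have hcond : ¬ ((PySem.List.pyGet? ing (pre.length : Int)).getD 0 ≠ 0) := by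
        rw [hget]; simp [hm]
      rw [if_neg hcond, hrange, ih (pre ++ [m]) acc hing']
      rw [henum, henum2]
      simp [hm]
    · have hcond : (PySem.List.pyGet? ing (pre.length : Int)).getD 0 ≠ 0 := by
        rw [hget]; simpa using hm
      rw [if_pos hcond, hrange,
        ih (pre ++ [m]) (acc.1 ++ [(PySem.List.pyGet? ing (pre.length:Int)).getD 0],
          acc.2 ++ [(pre.length : Int)]) hing']
      rw [henum, henum2, hget]
      simp [hm]

lemma map_snd_filter_enumerate (xs : List Int) : ∀ (s : Int),
    ((PySem.List.enumerate xs s).filter (fun p => decide (p.2 ≠ 0))).map Prod.snd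
      = filterNZ xs := by
  induction xs with
  | nil => intro s; simp [PySem.List.enumerate, filterNZ]
  | cons x xs ih =>
    intro s
    have ihs := ih (s + 1)
    rw [PySem.List.enumerate_cons]
    simp [filterNZ] at ihs ⊢
    by_cases hx : x = 0 <;> simp [hx, ihs]

lemma remove?_append_not_mem : ∀ {C : List Int} {D : List Int} {v : Int}, v ∉ C →
    PySem.List.remove? (C ++ v :: D) v = some (C ++ D)
  | [], D, v, _ => by simp [PySem.List.remove?_cons_self]
  | c :: C, D, v, h => by
    have hc : c ≠ v := fun hc => h (by simp [hc])
    rw [List.cons_append, PySem.List.remove?_cons_of_ne _ hc,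
      remove?_append_not_mem (fun hm => h (List.mem_cons_of_mem c hm))]
    rfl

-- zeroing both collected cells empties the part
lemma zeroed_part (rb : List Int) (s : Int) {i0 i1 : Int}
    (hE : (PySem.List.enumerate rb s).filter (fun p => decide (p.2 ≠ 0)) = [(i0, 2), (i1, 3)]) :
    filterNZ ((rb.set (i0 - s).toNat 0).set (i1 - s).toNat 0) = [] ∧
    (1 : Int) ∉ ((rb.set (i0 - s).toNat 0).set (i1 - s).toNat 0) := by
  have h0 : ((i0, (2:Int)) ∈ (PySem.List.enumerate rb s).filter (fun p => decide (p.2 ≠ 0))) := by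
    rw [hE]; simp
  have h1 : ((i1, (3:Int)) ∈ (PySem.List.enumerate rb s).filter (fun p => decide (p.2 ≠ 0))) := by
    rw [hE]; simp
  obtain ⟨k0, hk0, he0⟩ := (PySem.List.mem_enumerate_iff rb s _).mp (List.mem_of_mem_filter h0)
  obtain ⟨k1, hk1, he1⟩ := (PySem.List.mem_enumerate_iff rb s _).mp (List.mem_of_mem_filter h1)
  have hi0 : i0 = s + k0 ∧ rb[k0] = 2 := by
    constructor <;> [exact congrArg Prod.fst he0; exact (congrArg Prod.snd he0).symm]
  have hi1 : i1 = s + k1 ∧ rb[k1] = 3 := by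
    constructor <;> [exact congrArg Prod.fst he1; exact (congrArg Prod.snd he1).symm]
  have ht0 : (i0 - s).toNat = k0 := by omega
  have ht1 : (i1 - s).toNat = k1 := by omega
  have hcomplete : ∀ k : Nat, (hk : k < rb.length) → rb[k] ≠ 0 → k = k0 ∨ k = k1 := by
    intro k hk hnz
    have hmem : ((s + (k:Int), rb[k]) ∈ (PySem.List.enumerate rb s).filter
        (fun p => decide (p.2 ≠ 0))) := by
      apply List.mem_filter.mpr
      exact ⟨(PySem.List.mem_enumerate_iff rb s _).mpr ⟨k, hk, rfl⟩, by simpa using hnz⟩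
    rw [hE] at hmem
    simp only [List.mem_cons, List.mem_singleton] at hmem
    rcases hmem with hm | hm | hm
    · left
      have := congrArg Prod.fst hm
      simp at this; omega
    · right
      have := congrArg Prod.fst hm
      simp at this; omega
    · simp at hm
  set rz := (rb.set (i0 - s).toNat 0).set (i1 - s).toNat 0 with hrz
  have hall : ∀ x ∈ rz, x = 0 := by
    intro x hx
    obtain ⟨k, hk, hxe⟩ := List.mem_iff_getElem.mp hx
    have hklen : k < rb.length := by simpa [hrz] using hk
    simp only [hrz, List.getElem_set] at hxe
    by_cases hk1' : (i1 - s).toNat = k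
    · rw [if_pos hk1'] at hxe; omega
    · rw [if_neg hk1'] at hxe
      by_cases hk0' : (i0 - s).toNat = k
      · rw [if_pos hk0'] at hxe; omega
      · rw [if_neg hk0'] at hxe
        by_cases hz : rb[k] = 0
        · omega
        · rcases hcomplete k hklen hz with h | h <;> omega
  constructor
  · exact List.filter_eq_nil_iff.mpr (fun a ha => by simpa using hall a ha)
  · intro hmem
    have := hall 1 hmem
    omega

-- small list-surgery helpers used by the simulation proof
lemma set_at (X Z : List Int) (y v : Int) : (X ++ y :: Z).set X.length v = X ++ v :: Z := by
  simp

lemma set_mid (X M Z : List Int) (j : Nat) (v : Int) (hj : j < M.length) :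
    (X ++ (M ++ Z)).set (X.length + j) v = X ++ (M.set j v ++ Z) := by
  simp [hj]

lemma join1_mid_glue : ∀ (P0 Q0 : List (List Int)) (p qh mid : List Int),
    join1 (P0 ++ (p ++ mid ++ qh) :: Q0) = join1 (P0 ++ [p]) ++ mid ++ join1 (qh :: Q0) := by
  intro P0 Q0 p qh mid
  by_cases hP : P0 = []
  · subst hP
    by_cases hQ : Q0 = []
    · subst hQ; simp [join1]
    · simp only [List.nil_append]
      rw [join1_cons hQ, join1_cons hQ]
      simp [join1]
  · by_cases hQ : Q0 = []
    · subst hQ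
      rw [join1_append hP (by simp), join1_append hP (by simp)]
      simp [join1]
    · rw [join1_append hP (by simp), join1_append hP (by simp),
        join1_cons hQ, join1_cons hQ]
      simp [join1]

lemma pairwise_head_le_last {l : List Int} (hp : l.Pairwise (· < ·)) (hne : l ≠ []) :
    (l[0]?).getD 0 ≤ (l.getLast?).getD 0 := by
  have hlen : 0 < l.length := List.length_pos_iff.mpr hne
  rw [List.getLast?_eq_getElem?]
  rw [List.getElem?_eq_getElem hlen, List.getElem?_eq_getElem (by omega)]
  simp only [Option.getD_some]
  rcases Nat.eq_or_lt_of_le (Nat.le_sub_one_of_lt hlen) with h | h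
  · have h' : l.length - 1 = 0 := h.symm
    simp [h']
  · exact le_of_lt (List.pairwise_iff_getElem.mp hp 0 (l.length - 1) hlen (by omega) h)

lemma exit_case (R : List (List Int)) (b ans : Int)
    (hne : R ≠ []) (hfree : ∀ s ∈ R, (1 : Int) ∉ s)
    (hex : ¬ b < ((((onesP (join1 R)).map (Nat.cast : Nat → Int))).length : Int))
    (hI2 : ∀ i : Nat, 1 ≤ i → (i : Int) < b → i + 1 < R.length → filterNZ R[i]! ≠ [2, 3]) :
    solLoop (join1 R) ((onesP (join1 R)).map (Nat.cast : Nat → Int)) b ans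
      = ans + Sc (filterNZ (join1 R)) := by
  rw [solLoop, dif_neg hex]
  suffices h : Sc (filterNZ (join1 R)) = 0 by omega
  apply Sc_no
  intro hHB
  rw [filterNZ_join1] at hHB
  obtain ⟨i, hi, hlen, hget⟩ := hasB_join1 (R.map filterNZ)
    (fun s hs => by
      obtain ⟨t, ht, rfl⟩ := List.mem_map.mp hs
      intro h1
      exact hfree t ht (List.mem_of_mem_filter h1)) hHB
  have hlen' : i + 1 < R.length := by simpa using hlen
  have hval : filterNZ (R[i]!) = [2, 3] := by
    rw [List.getElem?_map] at hget
    rw [List.getElem?_eq_getElem (by omega : i < R.length)] at hget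
    simp only [Option.map_some, Option.some.injEq] at hget
    rwa [List.getElem!_eq_getElem?_getD, List.getElem?_eq_getElem (by omega : i < R.length)]
  have hblen := onesP_join1_len R hne hfree
  have hbl : ((onesP (join1 R)).length : Int) ≤ b := by
    rw [List.length_map] at hex
    omega
  exact hI2 i (by omega) (by omega) hlen' hval

lemma range_shift (A rb : List Int) :
    PySem.List.pyRange ((A.length : Int) + 1) ((A.length : Int) + (rb.length : Int) + 1) 1
      = PySem.List.pyRange (((A ++ [(1:Int)]).length : Int))
          (((A ++ [(1:Int)]).length : Int) + (rb.length : Int)) 1 := by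
  congr 1 <;> push_cast [List.length_append, List.length_cons, List.length_nil] <;> omega

lemma check_ham_core (A rb B : List Int) :
    check_ham (A ++ 1 :: (rb ++ 1 :: B)) (A.length : Int) ((A.length : Int) + (rb.length : Int) + 1)
      = (let E := (PySem.List.enumerate rb (((A ++ [(1:Int)]).length : Int))).filter
            (fun p => decide (p.2 ≠ 0));
         if ([2, 3] : List Int) = E.map Prod.snd then
           (let i4 := pySet0 (pySet0 (pySet0 (pySet0 (A ++ 1 :: (rb ++ 1 :: B)) (A.length : Int))
                ((A.length : Int) + (rb.length : Int) + 1))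
                ((PySem.List.pyGet? (E.map Prod.fst) 0).getD 0))
                ((PySem.List.pyGet? (E.map Prod.fst) 1).getD 0);
            (i4, 1))
         else (A ++ 1 :: (rb ++ 1 :: B), 0)) := by
  unfold check_ham
  rw [range_shift A rb]
  rw [ham_loop (A ++ 1 :: (rb ++ 1 :: B)) (1 :: B) rb (A ++ [1]) ([], [])
    (by simp)]
  simp only [List.nil_append]

lemma check_ham_fail (A rb B : List Int) (hne : ([2, 3] : List Int) ≠ filterNZ rb) :
    check_ham (A ++ 1 :: (rb ++ 1 :: B)) (A.length : Int) ((A.length : Int) + (rb.length : Int) + 1)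
      = (A ++ 1 :: (rb ++ 1 :: B), 0) := by
  rw [check_ham_core]
  simp only [map_snd_filter_enumerate]
  rw [if_neg hne]

lemma check_ham_succ (A rb B : List Int) (hfil : ([2, 3] : List Int) = filterNZ rb) :
    ∃ rz : List Int,
      check_ham (A ++ 1 :: (rb ++ 1 :: B)) (A.length : Int)
          ((A.length : Int) + (rb.length : Int) + 1)
        = (A ++ 0 :: (rz ++ 0 :: B), 1)
      ∧ rz.length = rb.length ∧ filterNZ rz = [] ∧ (1 : Int) ∉ rz := by
  rw [check_ham_core]
  simp only [map_snd_filter_enumerate]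
  rw [if_pos hfil]
  set s : Int := ((A ++ [(1:Int)]).length : Int) with hs
  set E := (PySem.List.enumerate rb s).filter (fun p => decide (p.2 ≠ 0)) with hEdef
  have hsnd : E.map Prod.snd = [2, 3] := by
    rw [hEdef, map_snd_filter_enumerate]; exact hfil.symm
  have hlenE : E.length = 2 := by
    have := congrArg List.length hsnd
    simpa using this
  obtain ⟨e0, e1, hE12⟩ := List.length_eq_two.mp hlenE
  have hvals : e0.2 = 2 ∧ e1.2 = 3 := by
    rw [hE12] at hsnd; simpa using hsnd
  have hE : E = [(e0.1, 2), (e1.1, 3)] := by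
    rw [hE12, ← hvals.1, ← hvals.2]
  -- positions inside rb
  have hm0 : e0 ∈ PySem.List.enumerate rb s := by
    apply List.mem_of_mem_filter (p := fun p => decide (p.2 ≠ 0))
    rw [← hEdef, hE12]; simp
  have hm1 : e1 ∈ PySem.List.enumerate rb s := by
    apply List.mem_of_mem_filter (p := fun p => decide (p.2 ≠ 0))
    rw [← hEdef, hE12]; simp
  obtain ⟨k0, hk0, he0⟩ := (PySem.List.mem_enumerate_iff rb s e0).mp hm0
  obtain ⟨k1, hk1, he1⟩ := (PySem.List.mem_enumerate_iff rb s e1).mp hm1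
  have hf0 : e0.1 = s + (k0 : Int) := by rw [he0]
  have hf1 : e1.1 = s + (k1 : Int) := by rw [he1]
  set rz := (rb.set k0 0).set k1 0 with hrz
  have hzp := zeroed_part rb s (i0 := e0.1) (i1 := e1.1) (by rw [← hEdef]; exact hE)
  have htn0 : (e0.1 - s).toNat = k0 := by rw [hf0]; omega
  have htn1 : (e1.1 - s).toNat = k1 := by rw [hf1]; omega
  rw [htn0, htn1] at hzp
  refine ⟨rz, ?_, by simp [hrz], hzp.1, hzp.2⟩
  -- now compute the four assignments
  have hidx0 : (PySem.List.pyGet? (E.map Prod.fst) 0).getD 0 = e0.1 := by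
    rw [hE]; rfl
  have hidx1 : (PySem.List.pyGet? (E.map Prod.fst) 1).getD 0 = e1.1 := by
    rw [hE]; rfl
  rw [hidx0, hidx1]
  have hslen : s = (A.length : Int) + 1 := by
    rw [hs]; push_cast [List.length_append, List.length_cons, List.length_nil]; omega
  -- assignment 1: position A.length
  have st1 : pySet0 (A ++ 1 :: (rb ++ 1 :: B)) (A.length : Int)
      = A ++ 0 :: (rb ++ 1 :: B) := by
    unfold pySet0
    rw [Int.toNat_natCast]
    exact set_at A (rb ++ 1 :: B) 1 0
  -- assignment 2: position A.length + rb.length + 1 = (A ++ 0 :: rb).length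
  have st2 : pySet0 (A ++ 0 :: (rb ++ 1 :: B)) ((A.length : Int) + (rb.length : Int) + 1)
      = A ++ 0 :: (rb ++ 0 :: B) := by
    unfold pySet0
    have hpos : ((A.length : Int) + (rb.length : Int) + 1).toNat = (A ++ 0 :: rb).length := by
      simp [List.length_append]; omega
    rw [hpos]
    rw [show A ++ 0 :: (rb ++ 1 :: B) = (A ++ 0 :: rb) ++ 1 :: B by simp]
    rw [set_at (A ++ 0 :: rb) B 1 0]
    simp
  -- assignment 3: position e0.1 = A.length + 1 + k0, inside rb
  have st3 : pySet0 (A ++ 0 :: (rb ++ 0 :: B)) e0.1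
      = A ++ 0 :: (rb.set k0 0 ++ 0 :: B) := by
    unfold pySet0
    have hpos : e0.1.toNat = (A ++ [(0:Int)]).length + k0 := by
      simp [List.length_append]; omega
    rw [hpos]
    rw [show A ++ 0 :: (rb ++ 0 :: B) = (A ++ [(0:Int)]) ++ (rb ++ 0 :: B) by simp]
    rw [set_mid (A ++ [(0:Int)]) rb (0 :: B) k0 0 hk0]
    simp
  -- assignment 4: position e1.1, inside rb.set k0 0
  have st4 : pySet0 (A ++ 0 :: (rb.set k0 0 ++ 0 :: B)) e1.1
      = A ++ 0 :: (rz ++ 0 :: B) := by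
    unfold pySet0
    have hpos : e1.1.toNat = (A ++ [(0:Int)]).length + k1 := by
      simp [List.length_append]; omega
    rw [hpos]
    rw [show A ++ 0 :: (rb.set k0 0 ++ 0 :: B) = (A ++ [(0:Int)]) ++ (rb.set k0 0 ++ 0 :: B) by simp]
    rw [set_mid (A ++ [(0:Int)]) (rb.set k0 0) (0 :: B) k1 0 (by simp [hk1])]
    simp [hrz]
  simp only [st1, st2, st3, st4]

-- ---- the main simulation: A's while loop computes the stack count ----
lemma MAIN : ∀ (n : Nat) (R : List (List Int)) (b ans : Int),
    2 * R.length ≤ n + b.toNat →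
    R ≠ [] → (∀ s ∈ R, (1 : Int) ∉ s) → 0 ≤ b →
    (∀ i : Nat, 1 ≤ i → (i : Int) < b → i + 1 < R.length → filterNZ R[i]! ≠ [2, 3]) →
    solLoop (join1 R) ((onesP (join1 R)).map (Nat.cast : Nat → Int)) b ans
      = ans + Sc (filterNZ (join1 R)) := by
  intro n
  induction n with
  | zero =>
    intro R b ans hbud hne hfree hb hI2
    apply exit_case R b ans hne hfree _ hI2
    have hpos := List.length_pos_iff.mpr hne
    have hol := onesP_join1_len R hne hfree
    rw [List.length_map]
    omega
  | succ n ih =>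
    intro R b ans hbud hne hfree hb hI2
    by_cases hex : b < (((onesP (join1 R)).map (Nat.cast : Nat → Int)).length : Int)
    case neg => exact exit_case R b ans hne hfree hex hI2
    have hol := onesP_join1_len R hne hfree
    have hmlen : ((onesP (join1 R)).map (Nat.cast : Nat → Int)).length
        = (onesP (join1 R)).length := by simp
    by_cases hb0 : b = 0
    · -- b = 0: Python reads bread[-1] (the last bread), the gap is ≤ 0, the test fails
      subst hb0
      rw [solLoop, dif_pos hex]
      have hbne : ((onesP (join1 R)).map (Nat.cast : Nat → Int)) ≠ [] := by
        intro hnil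
        rw [hnil] at hex
        simp at hex
      have hpw : ((onesP (join1 R)).map (Nat.cast : Nat → Int)).Pairwise (· < ·) :=
        List.pairwise_map.mpr ((onesP_pairwise _).imp (fun h => by exact_mod_cast h))
      have hle := pairwise_head_le_last hpw hbne
      have hq1 : PySem.List.pyGet? ((onesP (join1 R)).map (Nat.cast : Nat → Int)) (0 - 1)
          = ((onesP (join1 R)).map (Nat.cast : Nat → Int)).getLast? := by
        rw [show (0:Int) - 1 = -1 by omega]
        exact PySem.List.pyGet?_neg_one _
      rw [if_neg (by rw [hq1, PySem.List.pyGet?_zero]; omega)]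
      have hrec := ih R (0 + 1) ans (by omega) hne hfree (by omega)
        (fun i hi hib hlen => by exfalso; omega)
      exact hrec
    · -- 1 ≤ b : decompose R around the pair of breads at positions b-1, b
      have hb1 : 1 ≤ b := by omega
      have hnbR : b.toNat + 1 < R.length := by rw [hmlen] at hex; omega
      obtain ⟨P, rb, Q, hsplit, hPlen⟩ :
          ∃ P rb Q, R = P ++ rb :: Q ∧ P.length = b.toNat :=
        ⟨R.take b.toNat, R[b.toNat]'(by omega), R.drop (b.toNat + 1),
          by rw [List.getElem_cons_drop (by omega : b.toNat < R.length)]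
             exact (List.take_append_drop b.toNat R).symm,
          by rw [List.length_take]; omega⟩
      have hPne : P ≠ [] := by
        intro h; rw [h] at hPlen; simp at hPlen; omega
      have hRlen : R.length = P.length + 1 + Q.length := by rw [hsplit]; simp; omega
      have hQne : Q ≠ [] := by
        intro h; rw [h] at hRlen; simp at hRlen; omega
      have hfP : ∀ s ∈ P, (1:Int) ∉ s := fun s hs => hfree s (by rw [hsplit]; simp [hs])
      have hfQ : ∀ s ∈ Q, (1:Int) ∉ s := fun s hs => hfree s (by rw [hsplit]; simp [hs])
      have hfrb : (1:Int) ∉ rb := hfree rb (by rw [hsplit]; simp)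
      have hingeq : join1 R = join1 P ++ 1 :: (rb ++ 1 :: join1 Q) := by
        rw [hsplit, join1_append hPne (by simp), join1_cons hQne]
      have honesP : onesP (join1 R)
          = onesP (join1 P) ++ (join1 P).length :: ((join1 P).length + rb.length + 1) ::
            (onesP (join1 Q)).map (· + ((join1 P).length + rb.length + 2)) := by
        rw [hingeq]; exact onesP_block _ rb _ hfrb
      have hCAlen : (onesP (join1 P)).length + 1 = b.toNat := by
        have := onesP_join1_len P hPne hfP
        omega
      -- the bread list, decomposed
      have hbread : (onesP (join1 R)).map (Nat.cast : Nat → Int)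
          = (onesP (join1 P)).map (Nat.cast : Nat → Int)
            ++ ((join1 P).length : Int)
              :: (((join1 P).length : Int) + (rb.length : Int) + 1)
              :: ((onesP (join1 Q)).map (· + ((join1 P).length + rb.length + 2))).map
                   (Nat.cast : Nat → Int) := by
        rw [honesP]
        simp only [List.map_append, List.map_cons]
        push_cast
        ring_nf
      have hq1get : PySem.List.pyGet? ((onesP (join1 R)).map (Nat.cast : Nat → Int)) (b - 1)
          = some (((join1 P).length : Int)) := by
        rw [hbread]
        rw [show b - 1 = ((((onesP (join1 P)).map (Nat.cast : Nat → Int)).length : Nat) : Int) by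
          rw [List.length_map]; omega]
        exact PySem.List.pyGet?_append_length _ _ _
      have hqget : PySem.List.pyGet? ((onesP (join1 R)).map (Nat.cast : Nat → Int)) b
          = some (((join1 P).length : Int) + (rb.length : Int) + 1) := by
        rw [hbread]
        rw [show (onesP (join1 P)).map (Nat.cast : Nat → Int)
              ++ ((join1 P).length : Int)
                :: (((join1 P).length : Int) + (rb.length : Int) + 1)
                :: ((onesP (join1 Q)).map (· + ((join1 P).length + rb.length + 2))).map
                     (Nat.cast : Nat → Int)
            = ((onesP (join1 P)).map (Nat.cast : Nat → Int) ++ [((join1 P).length : Int)])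
              ++ (((join1 P).length : Int) + (rb.length : Int) + 1)
                :: ((onesP (join1 Q)).map (· + ((join1 P).length + rb.length + 2))).map
                     (Nat.cast : Nat → Int) by simp]
        rw [show b = ((((onesP (join1 P)).map (Nat.cast : Nat → Int)
              ++ [((join1 P).length : Int)]).length : Nat) : Int) by
          simp [List.length_append, List.length_map]; omega]
        exact PySem.List.pyGet?_append_length _ _ _
      rw [solLoop, dif_pos hex]
      simp only [hq1get, hqget, Option.getD_some]
      by_cases hgap : ((join1 P).length : Int) + (rb.length : Int) + 1 - ((join1 P).length : Int) ≥ 3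
      · -- the gap admits a burger: Python calls check_ham
        rw [if_pos hgap]
        by_cases hburger : ([2,3] : List Int) = filterNZ rb
        · -- success: the cells are zeroed, both breads leave the list, b steps back
          obtain ⟨rz, hch, hlenrz, hfz, hfz1⟩ := check_ham_succ (join1 P) rb (join1 Q) hburger
          rw [← hingeq] at hch
          rw [hch]
          rw [if_pos (by norm_num)]
          -- the two bread removals
          have hnm1 : (((join1 P).length : Int)) ∉ (onesP (join1 P)).map (Nat.cast : Nat → Int) := by
            intro hmem
            obtain ⟨k, hk, hck⟩ := List.mem_map.mp hmem
            have := onesP_lt (join1 P) k hk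
            omega
          have hnm2 : (((join1 P).length : Int) + (rb.length : Int) + 1)
              ∉ (onesP (join1 P)).map (Nat.cast : Nat → Int) := by
            intro hmem
            obtain ⟨k, hk, hck⟩ := List.mem_map.mp hmem
            have := onesP_lt (join1 P) k hk
            omega
          have hrem1 : PySem.List.remove? ((onesP (join1 R)).map (Nat.cast : Nat → Int))
              (((join1 P).length : Int))
              = some ((onesP (join1 P)).map (Nat.cast : Nat → Int)
                  ++ (((join1 P).length : Int) + (rb.length : Int) + 1)
                    :: ((onesP (join1 Q)).map (· + ((join1 P).length + rb.length + 2))).map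
                         (Nat.cast : Nat → Int)) := by
            rw [hbread]
            exact remove?_append_not_mem hnm1
          have hget2 : (PySem.List.pyGet? ((onesP (join1 P)).map (Nat.cast : Nat → Int)
              ++ (((join1 P).length : Int) + (rb.length : Int) + 1)
                :: ((onesP (join1 Q)).map (· + ((join1 P).length + rb.length + 2))).map
                     (Nat.cast : Nat → Int)) (b - 1)).getD 0
              = ((join1 P).length : Int) + (rb.length : Int) + 1 := by
            rw [show b - 1 = ((((onesP (join1 P)).map (Nat.cast : Nat → Int)).length : Nat) : Int) by
              rw [List.length_map]; omega]
            rw [PySem.List.pyGet?_append_length _ _ _]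
            rfl
          have hrem2 : PySem.List.remove? ((onesP (join1 P)).map (Nat.cast : Nat → Int)
              ++ (((join1 P).length : Int) + (rb.length : Int) + 1)
                :: ((onesP (join1 Q)).map (· + ((join1 P).length + rb.length + 2))).map
                     (Nat.cast : Nat → Int))
              (((join1 P).length : Int) + (rb.length : Int) + 1)
              = some ((onesP (join1 P)).map (Nat.cast : Nat → Int)
                  ++ ((onesP (join1 Q)).map (· + ((join1 P).length + rb.length + 2))).map
                       (Nat.cast : Nat → Int)) :=
            remove?_append_not_mem hnm2
          split
          case _ heq =>
            rw [hq1get] at heq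
            simp only [Option.getD_some] at heq
            rw [hrem1] at heq
            exact absurd heq (by simp)
          case _ bd1 heq =>
            rw [hq1get] at heq
            simp only [Option.getD_some] at heq
            rw [hrem1] at heq
            injection heq with heq'
            subst heq'
            split
            case _ heq2 =>
              rw [hget2, hrem2] at heq2
              exact absurd heq2 (by simp)
            case _ bd2 heq2 =>
              rw [hget2, hrem2] at heq2
              injection heq2 with heq2'
              subst heq2'
              -- the merged decomposition R'
              obtain ⟨P0, p, hP0⟩ : ∃ P0 p, P = P0 ++ [p] := by
                rcases List.eq_nil_or_concat P with h | ⟨P0, p, h⟩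
                · exact absurd h hPne
                · exact ⟨P0, p, by rw [h, List.concat_eq_append]⟩
              obtain ⟨qh, Q0, hQ0⟩ : ∃ qh Q0, Q = qh :: Q0 := by
                cases Q with
                | nil => exact absurd rfl hQne
                | cons qh Q0 => exact ⟨qh, Q0, rfl⟩
              set R' := P0 ++ (p ++ 0 :: (rz ++ 0 :: qh)) :: Q0 with hR'
              have hjoin' : join1 R' = join1 P ++ 0 :: (rz ++ 0 :: join1 Q) := by
                rw [hR', show p ++ 0 :: (rz ++ 0 :: qh) = p ++ ((0 :: rz ++ [0]) ++ qh) by simp]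
                rw [show P0 ++ (p ++ ((0 :: rz ++ [0]) ++ qh)) :: Q0
                    = P0 ++ (p ++ (0 :: rz ++ [0]) ++ qh) :: Q0 by simp]
                rw [join1_mid_glue P0 Q0 p qh (0 :: rz ++ [0])]
                rw [hP0, hQ0]
                simp
              have hR'len : R'.length = R.length - 2 := by
                rw [hR', hRlen, hP0, hQ0]
                simp
                omega
              have hfree' : ∀ s ∈ R', (1 : Int) ∉ s := by
                intro s hs
                rw [hR'] at hs
                rcases List.mem_append.mp hs with hs | hs
                · exact hfP s (by rw [hP0]; exact List.mem_append_left _ hs)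
                · rcases List.mem_cons.mp hs with rfl | hs
                  · intro hmem
                    rcases List.mem_append.mp hmem with h | h
                    · exact hfP p (by rw [hP0]; simp) h
                    · rcases List.mem_cons.mp h with h | h
                      · exact absurd h.symm (by norm_num)
                      · rcases List.mem_append.mp h with h | h
                        · exact hfz1 h
                        · rcases List.mem_cons.mp h with h | h
                          · exact absurd h.symm (by norm_num)
                          · exact hfQ qh (by rw [hQ0]; simp) h
                  · exact hfQ s (by rw [hQ0]; simp [hs])
              have hR'ne : R' ≠ [] := by rw [hR']; simp
              have honesP' : onesP (join1 R')
                  = onesP (join1 P) ++ (onesP (join1 Q)).map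
                      (· + ((join1 P).length + rz.length + 2)) := by
                rw [hjoin']
                exact onesP_block0 _ rz _ hfz1 (by norm_num)
              have hbread' : (onesP (join1 R')).map (Nat.cast : Nat → Int)
                  = (onesP (join1 P)).map (Nat.cast : Nat → Int)
                    ++ ((onesP (join1 Q)).map (· + ((join1 P).length + rb.length + 2))).map
                         (Nat.cast : Nat → Int) := by
                rw [honesP', hlenrz]
                simp
              have hI2' : ∀ i : Nat, 1 ≤ i → (i : Int) < b - 2 + 1 → i + 1 < R'.length →
                  filterNZ R'[i]! ≠ [2, 3] := by
                intro i hi hib hlen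
                have hiP0 : i < P0.length := by
                  have : P0.length + 1 = P.length := by rw [hP0]; simp
                  omega
                have hRi : R'[i]! = R[i]! := by
                  rw [hR', hsplit, hP0]
                  rw [List.getElem!_eq_getElem?_getD, List.getElem!_eq_getElem?_getD]
                  rw [List.getElem?_append_left hiP0,
                    List.getElem?_append_left (by simp; omega : i < (P0 ++ [p]).length),
                    List.getElem?_append_left hiP0]
                rw [hRi]
                exact hI2 i hi (by omega) (by omega)
              have hrec := ih R' (b - 2 + 1) (ans + 1)
                (by rw [hR'len]; omega) hR'ne hfree' (by omega) hI2'
              rw [hbread', hjoin'] at hrec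
              rw [hrec]
              -- the stack pops exactly once here
              have hfA : ¬ HasB (filterNZ (join1 P)) := by
                rw [filterNZ_join1]
                intro hHB
                obtain ⟨i, hi0, hilen, hget⟩ := hasB_join1 (P.map filterNZ)
                  (fun t ht => by
                    obtain ⟨u, hu, rfl⟩ := List.mem_map.mp ht
                    exact fun h1 => hfP u hu (List.mem_of_mem_filter h1)) hHB
                rw [List.length_map] at hilen
                have hval : filterNZ (R[i]!) = [2, 3] := by
                  rw [List.getElem?_map, List.getElem?_eq_getElem (by omega : i < P.length)] at hget
                  simp only [Option.map_some, Option.some.injEq] at hget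
                  rw [List.getElem!_eq_getElem?_getD, hsplit,
                    List.getElem?_append_left (by omega : i < P.length),
                    List.getElem?_eq_getElem (by omega : i < P.length)]
                  simpa using hget
                exact hI2 i (by omega) (by omega) (by omega) hval
              have hfE : ¬ Ends123 (filterNZ (join1 P)) := by
                rw [filterNZ_join1]
                apply ends123_join1 (P.map filterNZ)
                  (fun t ht => by
                    obtain ⟨u, hu, rfl⟩ := List.mem_map.mp ht
                    exact fun h1 => hfP u hu (List.mem_of_mem_filter h1))
                intro i hi0 hilen hget
                rw [List.length_map] at hilen
                have hval : filterNZ (R[i]!) = [2, 3] := by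
                  rw [List.getElem?_map, List.getElem?_eq_getElem (by omega : i < P.length)] at hget
                  simp only [Option.map_some, Option.some.injEq] at hget
                  rw [List.getElem!_eq_getElem?_getD, hsplit,
                    List.getElem?_append_left (by omega : i < P.length),
                    List.getElem?_eq_getElem (by omega : i < P.length)]
                  simpa using hget
                exact hI2 i (by omega) (by omega) (by omega) hval
              have hfiltR : filterNZ (join1 R)
                  = filterNZ (join1 P) ++ [1, 2, 3, 1] ++ filterNZ (join1 Q) := by
                rw [hingeq]
                rw [show join1 P ++ 1 :: (rb ++ 1 :: join1 Q)
                    = join1 P ++ ([1] ++ rb ++ [1] ++ join1 Q) by simp]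
                unfold filterNZ
                rw [List.filter_append, List.filter_append, List.filter_append,
                  List.filter_append]
                rw [show List.filter (fun x => decide (x ≠ 0)) [(1:Int)] = [1] by decide]
                rw [show List.filter (fun x => decide (x ≠ 0)) rb = [2, 3] from hburger.symm]
                simp
              have hfiltR' : filterNZ (join1 P ++ 0 :: (rz ++ 0 :: join1 Q))
                  = filterNZ (join1 P) ++ filterNZ (join1 Q) := by
                rw [show join1 P ++ 0 :: (rz ++ 0 :: join1 Q)
                    = join1 P ++ ([0] ++ rz ++ [0] ++ join1 Q) by simp]
                unfold filterNZ
                rw [List.filter_append, List.filter_append, List.filter_append,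
                  List.filter_append]
                rw [show List.filter (fun x => decide (x ≠ 0)) [(0:Int)] = [] by decide]
                rw [show List.filter (fun x => decide (x ≠ 0)) rz = [] from hfz]
                simp
              rw [hfiltR, hfiltR', Sc_reduce hfA hfE]
              omega
        · -- checking ≠ [2,3]: nothing collapses, b advances
          have hch := check_ham_fail (join1 P) rb (join1 Q) hburger
          rw [hingeq, hch]
          rw [if_neg (by simp)]
          have hI2' : ∀ i : Nat, 1 ≤ i → (i : Int) < b + 1 → i + 1 < R.length →
              filterNZ R[i]! ≠ [2, 3] := by
            intro i hi hib hlen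
            by_cases hieq : (i : Int) = b
            · have : i = b.toNat := by omega
              subst this
              have hRi : R[b.toNat]! = rb := by
                rw [hsplit]
                rw [List.getElem!_eq_getElem?_getD]
                rw [List.getElem?_append_right (by omega)]
                rw [hPlen]
                simp
              rw [hRi]
              exact fun hcontra => hburger hcontra.symm
            · exact hI2 i hi (by omega) hlen
          have hrec := ih R (b + 1) ans (by omega) hne hfree (by omega) hI2'
          rw [hingeq] at hrec
          exact hrec
      · -- gap < 3 (rb has at most one cell): b advances
        rw [if_neg hgap]
        have hrb1 : rb.length ≤ 1 := by omega
        have hI2' : ∀ i : Nat, 1 ≤ i → (i : Int) < b + 1 → i + 1 < R.length →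
            filterNZ R[i]! ≠ [2, 3] := by
          intro i hi hib hlen
          by_cases hieq : (i : Int) = b
          · have : i = b.toNat := by omega
            subst this
            have hRi : R[b.toNat]! = rb := by
              rw [hsplit]
              rw [List.getElem!_eq_getElem?_getD]
              rw [List.getElem?_append_right (by omega)]
              rw [hPlen]
              simp
            rw [hRi]
            intro hcontra
            have hlc := congrArg List.length hcontra
            have hfl := List.length_filter_le (fun x => decide (x ≠ 0)) rb
            simp [filterNZ] at hlc hfl
            omega
          · exact hI2 i hi (by omega) hlen
        have hrec := ih R (b + 1) ans (by omega) hne hfree (by omega) hI2'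
        exact hrec

lemma range_filter_ones : ∀ (ing : List Int),
    (List.range ing.length).filter (fun k => decide (ing[k]?.getD 0 = 1)) = onesP ing
  | [] => by simp [onesP]
  | x :: xs => by
    rw [List.length_cons, List.range_succ_eq_map, List.filter_cons]
    have hmap : ((List.range xs.length).map Nat.succ).filter
        (fun k => decide ((x :: xs)[k]?.getD 0 = 1))
        = ((List.range xs.length).filter (fun k => decide (xs[k]?.getD 0 = 1))).map Nat.succ := by
      rw [List.filter_map]
      congr 1
    rw [hmap, range_filter_ones xs]
    by_cases hx : x = 1 <;>
      simp [onesP, hx, Nat.succ_eq_add_one]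

lemma bread_build (ing : List Int) :
    (PySem.List.pyRange 0 (ing.length : Int) 1).foldl
      (fun (acc : List Int) i =>
        if (PySem.List.pyGet? ing i).getD 0 = 1 then acc ++ [i] else acc) []
    = (onesP ing).map (Nat.cast : Nat → Int) := by
  rw [PySem.List.foldl_append_ite_eq_filter, PySem.List.pyRange_one,
    ← range_filter_ones ing]
  rw [List.filter_map]
  simp only [Int.sub_zero, Int.toNat_natCast, List.nil_append]
  have hfun : ((fun i => decide ((PySem.List.pyGet? ing i).getD 0 = 1)) ∘ fun k : Nat => (0:Int) + ↑k)
      = fun k : Nat => decide (ing[k]?.getD 0 = 1) := by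
    funext k
    simp [PySem.List.pyGet?_natCast, Function.comp]
  rw [hfun]
  simp [← List.map_eq_flatMap]

-- ===== VERDICT (by name: the statement is the Claim_ definition above) =====
theorem solution_spec : Claim_equal_solution := by
  intro ing _
  unfold Spec_solution
  show solution ing = solution_alt ing
  have hR : join1 (split1 ing) = ing := join1_split1 ing
  have h := MAIN (2 * (split1 ing).length) (split1 ing) 1 0 (by omega)
    (split1_ne_nil ing) (split1_one_free ing) (by omega)
    (by intro i hi hib _; omega)
  rw [hR] at h
  rw [alt_eq_Sc]
  unfold solution
  rw [bread_build, h]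
  omega
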